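-- pv_equiv track=rewrite | github.com/paulbreen/AdventOfCode2025 | Day 6/Chat GPT/solver.py | find_problem_blocks
-- ===== SOURCE A (Python) =====
-- from typing import List, Tuple
--
-- def find_problem_blocks(lines: List[str]) -> List[Tuple[int, int]]:
--     """
--     Identify horizontal problem blocks.
--
--     A problem block is a maximal contiguous range of columns [start, end)
--     where NOT all rows (including operator row) are spaces.
--
--     Columns where every row is a space are separators between problems.
--     """
--     if not lines:
--         return []
--
--     num_rows = len(lines) - 1  # last row is the operator row
--     width = len(lines[0])
--     blocks: List[Tuple[int, int]] = []
--
--     c = 0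
--     while c < width:
--         # Column of all spaces across all rows -> separator
--         if all(lines[r][c] == " " for r in range(num_rows + 1)):
--             c += 1
--             continue
--
--         # Start of a problem block
--         start = c
--         c += 1
--         while c < width and not all(lines[r][c] == " " for r in range(num_rows + 1)):
--             c += 1
--         end = c
--         blocks.append((start, end))
--
--     return blocks
-- ===== SOURCE B (Python) =====
-- from typing import List, Tuple
--
-- def find_problem_blocks(lines: List[str]) -> List[Tuple[int, int]]:
--     """Boundary detection: build the set of non-blank columns, list the
--     left edges and right edges of its consecutive runs, and zip them."""
--     if not lines:
--         return []
--     width = len(lines[0])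
--     nonsep = {c for c in range(width)
--               if any(lines[r][c] != " " for r in range(len(lines)))}
--     starts = [c for c in range(width) if c in nonsep and c - 1 not in nonsep]
--     ends = [c for c in range(1, width + 1) if c - 1 in nonsep and c not in nonsep]
--     return list(zip(starts, ends))
-- ===== Notes on version B (the rewrite author's own statement) =====
-- stated objective: alternative
-- what changed: Replaces A's stateful nested while-loops by a stateless boundary-detection algorithm: build the set of non-blank columns, derive the run left-edges and right-edges as two independent comprehensions over that set, and zip them into ranges.
import Mathlib
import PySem

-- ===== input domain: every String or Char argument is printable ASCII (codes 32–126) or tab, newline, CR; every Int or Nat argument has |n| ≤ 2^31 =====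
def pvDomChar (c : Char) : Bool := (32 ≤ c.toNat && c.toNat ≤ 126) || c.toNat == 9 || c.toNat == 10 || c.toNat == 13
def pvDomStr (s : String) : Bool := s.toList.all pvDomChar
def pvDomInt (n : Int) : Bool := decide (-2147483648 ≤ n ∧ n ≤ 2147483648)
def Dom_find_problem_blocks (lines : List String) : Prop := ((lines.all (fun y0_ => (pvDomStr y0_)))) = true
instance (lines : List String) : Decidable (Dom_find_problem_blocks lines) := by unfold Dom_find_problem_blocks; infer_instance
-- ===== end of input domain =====

-- B replaces A's stateful nested while-loops by stateless boundary detection: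
-- the set of non-blank columns, two edge comprehensions, zipped (same cost, different algorithm).

-- ===== PORT A =====
-- `all(lines[r][c] == " " for r in range(num_rows + 1))`; num_rows + 1 = len(lines).
-- The `.getD ' '` default only fires where Python would raise IndexError after a
-- short-circuit; Pre_ excludes the inputs where Python actually raises, and where the
-- default fires under Pre_ an earlier row already made the `all` false, so the value is Python's.
def pvColSep (lines : List String) (c : Int) : Bool :=
  (List.range lines.length).all
    (fun r => ((PySem.Str.pyGet? (lines.getD r "") c).getD ' ') == ' ')

-- inner `while c < width and not all(...)`: returns the final c; fuel = remaining columns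
def pvInnerA (lines : List String) (width : Int) (c : Int) : Nat → Int
  | 0 => c
  | fuel + 1 =>
    if c < width && !(pvColSep lines c) then pvInnerA lines width (c + 1) fuel else c

-- outer `while c < width` loop accumulating blocks
def pvOuterA (lines : List String) (width : Int) (c : Int)
    (blocks : List (Int × Int)) : Nat → List (Int × Int)
  | 0 => blocks
  | fuel + 1 =>
    if c < width then
      if pvColSep lines c then pvOuterA lines width (c + 1) blocks fuel
      else
        let start := c
        let e := pvInnerA lines width (c + 1) fuel
        pvOuterA lines width e (blocks ++ [(start, e)]) fuel
    else blocks

def find_problem_blocks (lines : List String) : List (Int × Int) :=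
  if lines = [] then []
  else
    let width := PySem.Str.len (lines.headD "")
    pvOuterA lines width 0 [] width.toNat

-- ===== PORT B =====
-- `any(lines[r][c] != " " for r in range(len(lines)))` — same generator shape as A's
-- column test, negated; the `.getD ' '` default is justified exactly as in port A.
def pvColNonsep (lines : List String) (c : Int) : Bool :=
  (List.range lines.length).any
    (fun r => ((PySem.Str.pyGet? (lines.getD r "") c).getD ' ') != ' ')

def find_problem_blocks_alt (lines : List String) : List (Int × Int) :=
  if lines = [] then []
  else
    let width := PySem.Str.len (lines.headD "")
    -- {c for c in range(width) if any(...)}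
    let nonsep : PySem.Set Int :=
      PySem.Set.ofList
        ((PySem.List.pyRange 0 width 1).filter (fun c => pvColNonsep lines c))
    -- [c for c in range(width) if c in nonsep and c-1 not in nonsep]
    let starts := (PySem.List.pyRange 0 width 1).filter
      (fun c => PySem.Set.contains nonsep c && !(PySem.Set.contains nonsep (c - 1)))
    -- [c for c in range(1, width+1) if c-1 in nonsep and c not in nonsep]
    let ends := (PySem.List.pyRange 1 (width + 1) 1).filter
      (fun c => PySem.Set.contains nonsep (c - 1) && !(PySem.Set.contains nonsep c))
    starts.zip ends

-- ===== PRECONDITION & SPEC =====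
-- Pre_ excludes exactly the inputs on which Python A raises IndexError: a column c of the
-- first row where some row r is too short and no earlier row has a non-space at c (so the
-- short-circuiting `all` reaches the out-of-range access). On all such inputs B raises the
-- same IndexError, so nothing A returns on is excluded.
def Pre_find_problem_blocks (lines : List String) : Prop :=
  ∀ c ∈ List.range (lines.headD "").toList.length,
    ∀ r ∈ List.range lines.length,
      c < (lines.getD r "").toList.length ∨
      ∃ r' ∈ List.range r,
        c < (lines.getD r' "").toList.length ∧
        (lines.getD r' "").toList.getD c ' ' ≠ ' '
instance (lines : List String) : Decidable (Pre_find_problem_blocks lines) := by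
  unfold Pre_find_problem_blocks; infer_instance

def pvWitness_find_problem_blocks : List String := ["12 34", " +  *", "5  6 "]

def Spec_find_problem_blocks (lines : List String) (out : List (Int × Int)) : Prop := out = find_problem_blocks_alt lines
instance (lines : List String) (out : List (Int × Int)) : Decidable (Spec_find_problem_blocks lines out) := by unfold Spec_find_problem_blocks; infer_instance

-- ===== CLAIM (what is proved, stated in full; the proofs are below) =====
def Claim_equal_find_problem_blocks : Prop := ∀ (lines : List String), Dom_find_problem_blocks lines → Pre_find_problem_blocks lines → Spec_find_problem_blocks lines (find_problem_blocks lines)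

-- ===== LEMMAS AND PROOFS =====

-- the separator values for columns c, c+1, …, width-1
def pvSepFrom (lines : List String) (width c : Int) : List Bool :=
  (List.range (width - c).toNat).map (fun i : Nat => pvColSep lines (c + (i : Int)))

-- reference single sweep over a suffix of the separator table
def pvScan : List Bool → Int → Option Int → List (Int × Int)
  | [], _, none => []
  | [], c, some st => [(st, c)]
  | true :: rest, c, none => pvScan rest (c + 1) none
  | false :: rest, c, none => pvScan rest (c + 1) (some c)
  | true :: rest, c, some st => (st, c) :: pvScan rest (c + 1) none
  | false :: rest, c, some st => pvScan rest (c + 1) (some st)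

-- run left-edges / right-edges of a separator-list suffix; p = "previous column non-blank"
def pvStarts : List Bool → Int → Bool → List Int
  | [], _, _ => []
  | s :: rest, c, p => (if !s && !p then [c] else []) ++ pvStarts rest (c + 1) (!s)

def pvEnds : List Bool → Int → Bool → List Int
  | [], c, p => if p then [c] else []
  | s :: rest, c, p => (if s && p then [c] else []) ++ pvEnds rest (c + 1) (!s)

theorem pvSepFrom_nil (lines : List String) {width c : Int} (h : width ≤ c) :
    pvSepFrom lines width c = [] := by
  unfold pvSepFrom
  have : (width - c).toNat = 0 := by omega
  simp [this]

theorem pvSepFrom_cons (lines : List String) {width c : Int} (h : c < width) :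
    pvSepFrom lines width c = pvColSep lines c :: pvSepFrom lines width (c + 1) := by
  unfold pvSepFrom
  have h1 : (width - c).toNat = (width - (c + 1)).toNat + 1 := by omega
  rw [h1, List.range_succ_eq_map, List.map_cons, List.map_map]
  congr 1
  · norm_num
  · apply List.map_congr_left
    intro i _
    simp only [Function.comp_apply]
    congr 1
    push_cast
    ring

theorem pvInnerA_ge (lines : List String) (width : Int) :
    ∀ fuel c, c ≤ pvInnerA lines width c fuel := by
  intro fuel
  induction fuel with
  | zero => intro c; simp [pvInnerA]
  | succ n ih =>
    intro c
    simp only [pvInnerA]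
    split
    · exact le_trans (by omega) (ih (c + 1))
    · omega

theorem pvInnerA_le (lines : List String) (width : Int) :
    ∀ fuel c, c ≤ width → pvInnerA lines width c fuel ≤ width := by
  intro fuel
  induction fuel with
  | zero => intro c h; simpa [pvInnerA] using h
  | succ n ih =>
    intro c h
    simp only [pvInnerA]
    split
    · rename_i hc
      simp only [Bool.and_eq_true, decide_eq_true_eq] at hc
      exact ih (c + 1) (by omega)
    · exact h

theorem pvInner_scan (lines : List String) (width : Int) :
    ∀ fuel c st, (width - c).toNat ≤ fuel → c ≤ width →
      pvScan (pvSepFrom lines width c) c (some st) =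
        (st, pvInnerA lines width c fuel) ::
          pvScan (pvSepFrom lines width (pvInnerA lines width c fuel))
            (pvInnerA lines width c fuel) none := by
  intro fuel
  induction fuel with
  | zero =>
    intro c st hf hc
    have hcw : c = width := by omega
    simp [pvInnerA, pvSepFrom_nil lines (le_of_eq hcw.symm), pvScan]
  | succ n ih =>
    intro c st hf hc
    by_cases hcw : c < width
    · cases hsep : pvColSep lines c with
      | true =>
        have hstop : pvInnerA lines width c (n + 1) = c := by
          simp [pvInnerA, hsep]
        rw [hstop, pvSepFrom_cons lines hcw, hsep]
        simp [pvScan]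
      | false =>
        have hstep : pvInnerA lines width c (n + 1) = pvInnerA lines width (c + 1) n := by
          simp [pvInnerA, hcw, hsep]
        rw [hstep, pvSepFrom_cons lines hcw, hsep]
        simp only [pvScan]
        exact ih (c + 1) st (by omega) (by omega)
    · have hcw' : c = width := by omega
      have : pvInnerA lines width c (n + 1) = c := by
        simp [pvInnerA, show ¬ c < width from by omega]
      rw [this, pvSepFrom_nil lines (le_of_eq hcw'.symm)]
      simp [pvScan]

theorem pvOuter_scan (lines : List String) (width : Int) :
    ∀ fuel c blocks, (width - c).toNat ≤ fuel →
      pvOuterA lines width c blocks fuel =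
        blocks ++ pvScan (pvSepFrom lines width c) c none := by
  intro fuel
  induction fuel with
  | zero =>
    intro c blocks hf
    have : width ≤ c := by omega
    simp [pvOuterA, pvSepFrom_nil lines this, pvScan]
  | succ n ih =>
    intro c blocks hf
    by_cases hcw : c < width
    · rw [pvSepFrom_cons lines hcw]
      cases hsep : pvColSep lines c with
      | true =>
        simp only [pvOuterA, if_pos hcw, hsep, if_true]
        rw [ih (c + 1) blocks (by omega)]
        simp only [pvScan]
      | false =>
        simp only [pvOuterA, if_pos hcw, hsep]
        simp only [Bool.false_eq_true, if_false]
        set e := pvInnerA lines width (c + 1) n with he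
        have hge : c + 1 ≤ e := pvInnerA_ge lines width n (c + 1)
        have hle : e ≤ width := pvInnerA_le lines width n (c + 1) (by omega)
        rw [ih e (blocks ++ [(c, e)]) (by omega)]
        have hinner := pvInner_scan lines width n (c + 1) c (by omega) (by omega)
        rw [← he] at hinner
        simp only [pvScan]
        rw [hinner]
        simp
    · have : width ≤ c := by omega
      simp [pvOuterA, hcw, pvSepFrom_nil lines this, pvScan]

-- the sweep IS the zip of left edges with right edges
theorem pvScan_zip : ∀ (l : List Bool) (c : Int) (st : Option Int),
    pvScan l c st =
      (match st with
       | none => pvStarts l c false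
       | some s => s :: pvStarts l c true).zip (pvEnds l c st.isSome) := by
  intro l
  induction l with
  | nil =>
    intro c st
    cases st <;> simp [pvScan, pvStarts, pvEnds]
  | cons b rest ih =>
    intro c st
    cases st with
    | none =>
      cases b with
      | true => simpa [pvScan, pvStarts, pvEnds] using ih (c + 1) none
      | false => simpa [pvScan, pvStarts, pvEnds] using ih (c + 1) (some c)
    | some s0 =>
      cases b with
      | true => simpa [pvScan, pvStarts, pvEnds] using ih (c + 1) none
      | false => simpa [pvScan, pvStarts, pvEnds] using ih (c + 1) (some s0)

theorem pvNonsep_eq_not_sep (lines : List String) (c : Int) :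
    pvColNonsep lines c = !pvColSep lines c := by
  unfold pvColNonsep pvColSep
  rw [List.all_eq_not_any_not, Bool.not_not]
  congr 1

-- membership in B's non-blank-column list
theorem pvMem_nonsepList (lines : List String) (width x : Int) :
    (x ∈ (PySem.List.pyRange 0 width 1).filter (fun c => pvColNonsep lines c)) ↔
      (0 ≤ x ∧ x < width ∧ pvColSep lines x = false) := by
  simp [List.mem_filter, PySem.List.mem_pyRange_one, pvNonsep_eq_not_sep, and_assoc]

theorem pvContains_nonsep (lines : List String) (width x : Int) :
    PySem.Set.contains
        (PySem.Set.ofList ((PySem.List.pyRange 0 width 1).filter (fun c => pvColNonsep lines c))) x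
      = (decide (0 ≤ x) && decide (x < width) && !pvColSep lines x) := by
  by_cases h : 0 ≤ x ∧ x < width ∧ pvColSep lines x = false
  · have hm : x ∈ (PySem.List.pyRange 0 width 1).filter (fun c => pvColNonsep lines c) :=
      (pvMem_nonsepList lines width x).2 h
    have hc : PySem.Set.contains
        (PySem.Set.ofList ((PySem.List.pyRange 0 width 1).filter (fun c => pvColNonsep lines c))) x
        = true := by
      rw [PySem.Set.contains_iff, PySem.Set.mem_ofList]
      exact hm
    rw [hc]
    obtain ⟨h1, h2, h3⟩ := h
    simp [h1, h2, h3]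
  · have hm : x ∉ (PySem.List.pyRange 0 width 1).filter (fun c => pvColNonsep lines c) := by
      intro hx; exact h ((pvMem_nonsepList lines width x).1 hx)
    have hc : PySem.Set.contains
        (PySem.Set.ofList ((PySem.List.pyRange 0 width 1).filter (fun c => pvColNonsep lines c))) x
        = false := by
      rw [Bool.eq_false_iff]
      intro hx
      exact hm ((PySem.Set.mem_ofList _ _).1 ((PySem.Set.contains_iff _ _).1 hx))
    rw [hc]
    rcases Bool.eq_false_or_eq_true (pvColSep lines x) with hs | hs <;>
      · by_cases h0 : 0 ≤ x <;> by_cases h1 : x < width <;> simp_all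

-- pvStarts on the separator table equals B's left-edge comprehension
theorem pvStarts_filter (lines : List String) (width : Int)
    (NL : List Int)
    (hNL : NL = (PySem.List.pyRange 0 width 1).filter (fun c => pvColNonsep lines c)) :
    ∀ fuel (c : Int) (p : Bool), (width - c).toNat ≤ fuel → 0 ≤ c → c ≤ width →
      p = (decide (1 ≤ c) && !pvColSep lines (c - 1)) →
      pvStarts (pvSepFrom lines width c) c p =
        (PySem.List.pyRange c width 1).filter
          (fun x => PySem.Set.contains (PySem.Set.ofList NL) x &&
                    !(PySem.Set.contains (PySem.Set.ofList NL) (x - 1))) := by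
  intro fuel
  induction fuel with
  | zero =>
    intro c p hf h0 hw hp
    have : c = width := by omega
    rw [this, pvSepFrom_nil lines le_rfl, PySem.List.pyRange_one_eq_nil le_rfl]
    simp [pvStarts]
  | succ n ih =>
    intro c p hf h0 hw hp
    by_cases hcw : c < width
    · rw [pvSepFrom_cons lines hcw, PySem.List.pyRange_one_cons hcw, List.filter_cons]
      have hc1 : PySem.Set.contains (PySem.Set.ofList NL) c = !pvColSep lines c := by
        rw [hNL, pvContains_nonsep, decide_eq_true h0, decide_eq_true hcw]
        simp
      have hc2 : PySem.Set.contains (PySem.Set.ofList NL) (c - 1) = p := by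
        rw [hNL, pvContains_nonsep, hp]
        by_cases h1 : 1 ≤ c
        · rw [decide_eq_true (show (0:Int) ≤ c - 1 by omega),
            decide_eq_true (show c - 1 < width by omega), decide_eq_true h1]
          simp
        · rw [decide_eq_false (show ¬ (0:Int) ≤ c - 1 by omega), decide_eq_false h1]
          simp
      rw [hc1, hc2]
      have hrec := ih (c + 1) (!pvColSep lines c) (by omega) (by omega) (by omega)
        (by rw [decide_eq_true (show (1:Int) ≤ c + 1 by omega)]; simp)
      simp only [pvStarts, hrec]
      cases hs : pvColSep lines c <;> cases hpv : p <;> simp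
    · have : c = width := by omega
      rw [this, pvSepFrom_nil lines le_rfl, PySem.List.pyRange_one_eq_nil le_rfl]
      simp [pvStarts]

-- pvEnds on the separator table (from column c ≥ 1) equals B's right-edge comprehension tail
theorem pvEnds_filter (lines : List String) (width : Int)
    (NL : List Int)
    (hNL : NL = (PySem.List.pyRange 0 width 1).filter (fun c => pvColNonsep lines c)) :
    ∀ fuel (c : Int) (p : Bool), (width - c).toNat ≤ fuel → 1 ≤ c → c ≤ width →
      p = !pvColSep lines (c - 1) →
      pvEnds (pvSepFrom lines width c) c p =
        (PySem.List.pyRange c (width + 1) 1).filter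
          (fun x => PySem.Set.contains (PySem.Set.ofList NL) (x - 1) &&
                    !(PySem.Set.contains (PySem.Set.ofList NL) x)) := by
  intro fuel
  induction fuel with
  | zero =>
    intro c p hf h1 hw hp
    have hc : c = width := by omega
    subst hc
    rw [pvSepFrom_nil lines le_rfl,
      show PySem.List.pyRange c (c + 1) 1 = [c] from PySem.List.pyRange_one_singleton c]
    have hm1 : PySem.Set.contains (PySem.Set.ofList NL) (c - 1) = p := by
      rw [hNL, pvContains_nonsep, hp,
        decide_eq_true (show (0:Int) ≤ c - 1 by omega),
        decide_eq_true (show c - 1 < c by omega)]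
      simp
    have hm2 : PySem.Set.contains (PySem.Set.ofList NL) c = false := by
      rw [hNL, pvContains_nonsep, decide_eq_false (show ¬ c < c by omega)]
      simp
    rw [List.filter_cons]
    simp only [hm1, hm2, List.filter_nil]
    cases hpv : p <;> simp [pvEnds]
  | succ n ih =>
    intro c p hf h1 hw hp
    by_cases hcw : c < width
    · rw [pvSepFrom_cons lines hcw,
        PySem.List.pyRange_one_cons (show c < width + 1 from by omega), List.filter_cons]
      have hm1 : PySem.Set.contains (PySem.Set.ofList NL) (c - 1) = p := by
        rw [hNL, pvContains_nonsep, hp,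
          decide_eq_true (show (0:Int) ≤ c - 1 by omega),
          decide_eq_true (show c - 1 < width by omega)]
        simp
      have hm2 : PySem.Set.contains (PySem.Set.ofList NL) c = !pvColSep lines c := by
        rw [hNL, pvContains_nonsep, decide_eq_true (show (0:Int) ≤ c by omega),
          decide_eq_true hcw]
        simp
      rw [hm1, hm2]
      have hrec := ih (c + 1) (!pvColSep lines c) (by omega) (by omega) (by omega)
        (by norm_num)
      simp only [pvEnds, hrec]
      cases hs : pvColSep lines c <;> cases hpv : p <;> simp
    · have hc : c = width := by omega
      subst hc
      rw [pvSepFrom_nil lines le_rfl,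
        show PySem.List.pyRange c (c + 1) 1 = [c] from PySem.List.pyRange_one_singleton c]
      have hm1 : PySem.Set.contains (PySem.Set.ofList NL) (c - 1) = p := by
        rw [hNL, pvContains_nonsep, hp,
          decide_eq_true (show (0:Int) ≤ c - 1 by omega),
          decide_eq_true (show c - 1 < c by omega)]
        simp
      have hm2 : PySem.Set.contains (PySem.Set.ofList NL) c = false := by
        rw [hNL, pvContains_nonsep, decide_eq_false (show ¬ c < c by omega)]
        simp
      rw [List.filter_cons]
      simp only [hm1, hm2, List.filter_nil]
      cases hpv : p <;> simp [pvEnds]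

-- pvEnds from 0 with p = false equals the full right-edge comprehension (range starts at 1)
theorem pvEnds_zero (lines : List String) (width : Int) (h0 : 0 ≤ width)
    (NL : List Int)
    (hNL : NL = (PySem.List.pyRange 0 width 1).filter (fun c => pvColNonsep lines c)) :
    pvEnds (pvSepFrom lines width 0) 0 false =
      (PySem.List.pyRange 1 (width + 1) 1).filter
        (fun x => PySem.Set.contains (PySem.Set.ofList NL) (x - 1) &&
                  !(PySem.Set.contains (PySem.Set.ofList NL) x)) := by
  by_cases hw : (0:Int) < width
  · rw [pvSepFrom_cons lines hw]
    have hstep : pvEnds (pvColSep lines 0 :: pvSepFrom lines width (0 + 1)) 0 false =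
        pvEnds (pvSepFrom lines width 1) 1 (!pvColSep lines 0) := by
      simp [pvEnds]
    rw [hstep]
    exact pvEnds_filter lines width NL hNL (width - 1).toNat 1 (!pvColSep lines 0)
      (by omega) le_rfl (by omega) (by norm_num)
  · have hww : width = 0 := by omega
    subst hww
    rw [pvSepFrom_nil lines le_rfl, PySem.List.pyRange_one_eq_nil (by norm_num)]
    simp [pvEnds]

-- ===== VERDICT (by name: the statement is the Claim_ definition above) =====
theorem find_problem_blocks_spec : Claim_equal_find_problem_blocks := by
  intro lines _ _
  unfold Spec_find_problem_blocks find_problem_blocks find_problem_blocks_alt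
  by_cases hnil : lines = []
  · simp [hnil]
  · simp only [if_neg hnil]
    set width := PySem.Str.len (lines.headD "") with hw
    have hw0 : 0 ≤ width := by
      rw [hw, PySem.Str.len_eq]
      positivity
    set NL := (PySem.List.pyRange 0 width 1).filter (fun c => pvColNonsep lines c) with hNL
    rw [pvOuter_scan lines width width.toNat 0 [] (by omega), List.nil_append, pvScan_zip]
    simp only [Option.isSome_none]
    rw [pvStarts_filter lines width NL hNL width.toNat 0 false (by omega) le_rfl hw0
        (by norm_num),
      pvEnds_zero lines width hw0 NL hNL]
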